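-- pv_equiv track=rewrite | github.com/qcrit/NHB-2018-OEstylometry | sense_pauses/tools.py | generateCorpstr
-- ===== SOURCE A (Python) =====
-- def punct(mychr):
-- 	"""returns whether mychr is in a punctuation list or not"""
-- 	if mychr == '!' or mychr == ';' or mychr == '?' or mychr == '.' or mychr == ':' or mychr == '(' or mychr == ')':
-- 		return True
-- 	else:
-- 		return False
--
-- def generateCorpstr(mydata, spaces):
-- 	"""changes mydata datastr to corpus string, spaces- may or may not include"""
-- 	# add mydata to corpstr
-- 	corpstr = ""
-- 	pastchara = ""
-- 	for datapiece in mydata: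
-- 		tempstr = ""
-- 		for chara in datapiece[1]:
-- 			if chara not in ["-", ",","\n","\r","\t","#","\ufeff",'"', "'"] and not punct(chara):
-- 				if not (spaces == False and chara == " "):
-- 					if not (chara == " " and pastchara == " "): # avoid double spaces
-- 						tempstr += chara
-- 					pastchara = chara
-- 		corpstr += tempstr
--
-- 	return corpstr
-- ===== SOURCE B (Python) =====
-- def generateCorpstr(mydata, spaces):
-- 	"""changes mydata datastr to corpus string, spaces- may or may not include"""
-- 	# one flat filtering pass over all datapieces, then a separate double-space collapse pass
-- 	dropped = {"-", ",", "\n", "\r", "\t", "#", "\ufeff", '"', "'", '!', ';', '?', '.', ':', '(', ')'}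
-- 	filtered = [ch for datapiece in mydata for ch in datapiece[1]
-- 	            if ch not in dropped and not (spaces == False and ch == " ")]
-- 	out = []
-- 	prev_space = False
-- 	for ch in filtered:
-- 		if ch == " ":
-- 			if not prev_space:
-- 				out.append(ch)
-- 			prev_space = True
-- 		else:
-- 			out.append(ch)
-- 			prev_space = False
-- 	return "".join(out)
-- ===== Notes on version B (the rewrite author's own statement) =====
-- stated objective: simpler
-- what changed: A threads a pastchara state through nested per-datapiece loops with an inline exclusion chain; B does one flat filtering pass over all characters (single combined excluded set, explicit spaces guard) and then collapses double spaces in a separate second pass.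
import Mathlib
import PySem

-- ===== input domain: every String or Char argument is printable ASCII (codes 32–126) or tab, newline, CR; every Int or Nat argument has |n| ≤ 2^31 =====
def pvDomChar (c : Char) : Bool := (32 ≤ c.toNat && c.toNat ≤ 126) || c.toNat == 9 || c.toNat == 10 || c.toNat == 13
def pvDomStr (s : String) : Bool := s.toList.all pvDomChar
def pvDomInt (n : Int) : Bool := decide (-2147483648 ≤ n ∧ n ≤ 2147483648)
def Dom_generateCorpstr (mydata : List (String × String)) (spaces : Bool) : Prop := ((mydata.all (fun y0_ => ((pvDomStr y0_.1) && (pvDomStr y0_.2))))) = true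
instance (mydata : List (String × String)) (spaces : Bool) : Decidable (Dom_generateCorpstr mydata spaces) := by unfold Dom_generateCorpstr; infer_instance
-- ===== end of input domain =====

-- B replaces A's single stateful pass (pastchara threaded through nested loops) by a flat

-- B replaces A's single stateful pass (pastchara threaded through nested loops) by a flat
-- filtering pass followed by a separate double-space-collapse pass: a plainer decomposition (a timing run also measured it faster by a constant factor).

-- ===== PORT A =====
def pvPunct (mychr : Char) : Bool :=
  mychr == '!' || mychr == ';' || mychr == '?' || mychr == '.' || mychr == ':' || mychr == '(' || mychr == ')'

def pvAExcl : List Char := ['-', ',', '\n', '\r', '\t', '#', '\uFEFF', '"', '\'']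

-- loop body of A; state = (tempstr built so far, pastchara — Python's "" / one-char string, as List Char)
def pvStepA (spaces : Bool) (st : List Char × List Char) (chara : Char) : List Char × List Char :=
  if !(pvAExcl.contains chara) && !(pvPunct chara) then
    if !(spaces == false && chara == ' ') then
      ((if !(chara == ' ' && st.2 == [' ']) then st.1 ++ [chara] else st.1), [chara])
    else st
  else st

def generateCorpstr (mydata : List (String × String)) (spaces : Bool) : String :=
  let st := mydata.foldl (fun st datapiece =>
      let r := datapiece.2.toList.foldl (pvStepA spaces) ([], st.2)
      (st.1 ++ r.1, r.2)) (([] : List Char), ([] : List Char))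
  String.mk st.1

-- ===== PORT B =====
def pvDropped : List Char := ['-', ',', '\n', '\r', '\t', '#', '\uFEFF', '"', '\'', '!', ';', '?', '.', ':', '(', ')']

def pvKeep (spaces : Bool) (ch : Char) : Bool :=
  !(pvDropped.contains ch) && !(spaces == false && ch == ' ')

-- loop body of Source B's second pass; state = (out, prev_space)
def pvCollapseStep (st : List Char × Bool) (ch : Char) : List Char × Bool :=
  if ch == ' ' then ((if st.2 then st.1 else st.1 ++ [ch]), true)
  else (st.1 ++ [ch], false)

def generateCorpstr_alt (mydata : List (String × String)) (spaces : Bool) : String :=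
  let filtered := mydata.flatMap (fun datapiece => datapiece.2.toList.filter (pvKeep spaces))
  String.mk (filtered.foldl pvCollapseStep ([], false)).1

-- ===== PRECONDITION & SPEC =====
def Spec_generateCorpstr (mydata : List (String × String)) (spaces : Bool) (out : String) : Prop := out = generateCorpstr_alt mydata spaces
instance (mydata : List (String × String)) (spaces : Bool) (out : String) : Decidable (Spec_generateCorpstr mydata spaces out) := by unfold Spec_generateCorpstr; infer_instance

-- ===== CLAIM (what is proved, stated in full; the proofs are below) =====
def Claim_equal_generateCorpstr : Prop := ∀ (mydata : List (String × String)) (spaces : Bool), Dom_generateCorpstr mydata spaces → Spec_generateCorpstr mydata spaces (generateCorpstr mydata spaces)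

-- ===== LEMMAS AND PROOFS =====

-- collapse of runs of spaces, recursively (flag = last emitted char was a space)
def pvCAux : Bool → List Char → List Char
  | _, [] => []
  | b, c :: cs => if c = ' ' then (if b then pvCAux true cs else ' ' :: pvCAux true cs) else c :: pvCAux false cs

theorem pvKeep_split (s : Bool) (c : Char) :
    pvKeep s c = true ↔ ((!pvAExcl.contains c && !pvPunct c) = true ∧ (!(s == false && c == ' ')) = true) := by
  simp [pvKeep, pvDropped, pvAExcl, pvPunct]
  tauto


theorem pvStepA_keep_app (s : Bool) (st : List Char × List Char) (c : Char)
    (h1 : (!pvAExcl.contains c && !pvPunct c) = true)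
    (h2 : (!(s == false && c == ' ')) = true)
    (h3 : (!(c == ' ' && st.2 == [' '])) = true) :
    pvStepA s st c = (st.1 ++ [c], [c]) := by
  unfold pvStepA; rw [if_pos h1, if_pos h2, if_pos h3]

theorem pvStepA_keep_skip (s : Bool) (st : List Char × List Char) (c : Char)
    (h1 : (!pvAExcl.contains c && !pvPunct c) = true)
    (h2 : (!(s == false && c == ' ')) = true)
    (h3 : ¬ (!(c == ' ' && st.2 == [' '])) = true) :
    pvStepA s st c = (st.1, [c]) := by
  unfold pvStepA; rw [if_pos h1, if_pos h2, if_neg h3]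

theorem pvStepA_drop2 (s : Bool) (st : List Char × List Char) (c : Char)
    (h1 : (!pvAExcl.contains c && !pvPunct c) = true)
    (h2 : ¬ (!(s == false && c == ' ')) = true) :
    pvStepA s st c = st := by
  unfold pvStepA; rw [if_pos h1, if_neg h2]

theorem pvStepA_drop1 (s : Bool) (st : List Char × List Char) (c : Char)
    (h1 : ¬ (!pvAExcl.contains c && !pvPunct c) = true) :
    pvStepA s st c = st := by
  unfold pvStepA; rw [if_neg h1]

theorem pvCollapse_fold (l : List Char) (acc : List Char) (b : Bool) :
    (l.foldl pvCollapseStep (acc, b)).1 = acc ++ pvCAux b l := by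
  induction l generalizing acc b with
  | nil => simp [pvCAux]
  | cons c cs ih =>
    by_cases hc : c = ' '
    · subst hc
      cases b <;> simp [pvCollapseStep, pvCAux, ih]
    · simp [pvCollapseStep, pvCAux, hc, ih]

theorem pvStepA_fold_append (s : Bool) (cs : List Char) (acc p : List Char) :
    cs.foldl (pvStepA s) (acc, p) =
      (acc ++ (cs.foldl (pvStepA s) ([], p)).1, (cs.foldl (pvStepA s) ([], p)).2) := by
  induction cs generalizing acc p with
  | nil => simp
  | cons c cs ih =>
    simp only [List.foldl_cons]
    by_cases h1 : (!pvAExcl.contains c && !pvPunct c) = true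
    · by_cases h2 : (!(s == false && c == ' ')) = true
      · by_cases h3 : (!(c == ' ' && p == [' '])) = true
        · rw [pvStepA_keep_app s (acc, p) c h1 h2 h3, pvStepA_keep_app s ([], p) c h1 h2 h3]
          simp only [List.nil_append]
          rw [ih (acc ++ [c]) [c], ih [c] [c]]
          simp
        · rw [pvStepA_keep_skip s (acc, p) c h1 h2 h3, pvStepA_keep_skip s ([], p) c h1 h2 h3]
          exact ih acc [c]
      · rw [pvStepA_drop2 s (acc, p) c h1 h2, pvStepA_drop2 s ([], p) c h1 h2]
        exact ih acc p
    · rw [pvStepA_drop1 s (acc, p) c h1, pvStepA_drop1 s ([], p) c h1]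
      exact ih acc p

theorem pvStepA_fold_cAux (s : Bool) (cs : List Char) (p : List Char) :
    (cs.foldl (pvStepA s) ([], p)).1 = pvCAux (p == [' ']) (cs.filter (pvKeep s)) := by
  induction cs generalizing p with
  | nil => simp [pvCAux]
  | cons c cs ih =>
    simp only [List.foldl_cons, List.filter_cons]
    by_cases h1 : (!pvAExcl.contains c && !pvPunct c) = true
    · by_cases h2 : (!(s == false && c == ' ')) = true
      · have hk : pvKeep s c = true := (pvKeep_split s c).mpr ⟨h1, h2⟩
        rw [hk]
        simp only [if_true]
        by_cases h3 : (!(c == ' ' && p == [' '])) = true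
        · rw [pvStepA_keep_app s ([], p) c h1 h2 h3]
          simp only [List.nil_append]
          rw [pvStepA_fold_append s cs [c] [c], ih [c]]
          by_cases hc : c = ' '
          · subst hc
            have hp : (p == [' ']) = false := by
              simp only [Bool.not_and, Bool.or_eq_true, Bool.not_eq_eq_eq_not, Bool.not_true] at h3
              rcases h3 with h | h
              · simp at h
              · exact h
            simp [hp, pvCAux]
          · have hcb : (c == ' ') = false := by simpa using hc
            have hcl : ([c] == [' ']) = false := by simp [hc]
            rw [hcl]
            cases hpb : (p == [' ']) <;> simp [pvCAux, hc]
        · have h3' : c = ' ' ∧ p = [' '] := by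
            simp only [Bool.not_eq_true, Bool.not_eq_false'] at h3
            simpa using h3
          obtain ⟨hc, hp⟩ := h3'
          subst hc; subst hp
          rw [pvStepA_keep_skip s ([], [' ']) ' ' h1 h2 h3]
          rw [ih [' ']]
          simp [pvCAux]
      · have hk : pvKeep s c = false := by
          rw [Bool.eq_false_iff]
          intro hkt
          exact h2 ((pvKeep_split s c).mp hkt).2
        rw [hk]
        simp only [Bool.false_eq_true, if_false]
        rw [pvStepA_drop2 s ([], p) c h1 h2]
        exact ih p
    · have hk : pvKeep s c = false := by
        rw [Bool.eq_false_iff]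
        intro hkt
        exact h1 ((pvKeep_split s c).mp hkt).1
      rw [hk]
      simp only [Bool.false_eq_true, if_false]
      rw [pvStepA_drop1 s ([], p) c h1]
      exact ih p

theorem pvOuter_flat (s : Bool) (pieces : List (String × String)) (acc p : List Char) :
    pieces.foldl (fun st datapiece =>
        let r := datapiece.2.toList.foldl (pvStepA s) ([], st.2)
        (st.1 ++ r.1, r.2)) (acc, p) =
      (pieces.flatMap (fun dp => dp.2.toList)).foldl (pvStepA s) (acc, p) := by
  induction pieces generalizing acc p with
  | nil => simp
  | cons dp rest ih =>
    simp only [List.foldl_cons, List.flatMap_cons, List.foldl_append]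
    rw [ih, pvStepA_fold_append s dp.2.toList acc p]

theorem pvFilter_flatMap (q : Char → Bool) (l : List (String × String)) (f : String × String → List Char) :
    (l.flatMap f).filter q = l.flatMap (fun x => (f x).filter q) := by
  induction l with
  | nil => simp
  | cons x xs ih => simp [List.filter_append, ih]

-- ===== VERDICT (by name: the statement is the Claim_ definition above) =====
theorem generateCorpstr_spec : Claim_equal_generateCorpstr := by
  intro mydata spaces _
  unfold Spec_generateCorpstr generateCorpstr generateCorpstr_alt
  simp only [pvOuter_flat]
  simp only [pvStepA_fold_cAux, pvFilter_flatMap, pvCollapse_fold]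
  simp
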